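-- pv_equiv track=rewrite | github.com/wzygxr/shuati | class056_XOR_Operations/Code11_XorExtendedProblems.py | xor_longest_path
-- ===== SOURCE A (Python) =====
-- class TrieNode:
--     """前缀树节点类"""
--     def __init__(self):
--         self.children = {}  # 子节点字典
--         self.count = 0      # 通过该节点的路径数
--
-- def xor_longest_path(n: int, edges: list[tuple[int, int, int]]) -> int:
--     """
--     题目3: The XOR-longest Path (POJ 3764)
--
--     题目来源: POJ 3764
--     链接: http://poj.org/problem?id=3764
--
--     题目描述:
--     给定一棵带权树，每条边有一个权值。找到树中最长的一条路径，使得路径上的边权异或值最大。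
--
--     解题思路:
--     1. 计算每个节点到根节点的路径异或值xorPath[u]
--     2. 任意两点u和v之间的路径异或值 = xorPath[u] ^ xorPath[v]
--     3. 问题转化为在xorPath数组中找出两个数，使得它们的异或值最大
--     4. 使用前缀树(Trie)解决最大异或对问题
--
--     时间复杂度: O(n * 32)
--     空间复杂度: O(n * 32)
--
--     工程化考量:
--     - 使用邻接表存储树结构
--     - 深度优先搜索计算路径异或值
--     - 前缀树优化最大异或查询
--
--     Args:
--         n: 节点数量
--         edges: 边列表，每个边为[u, v, weight]
--
--     Returns:
--         最长异或路径的值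
--     """
--     # 构建邻接表
--     graph = [[] for _ in range(n)]
--     for u, v, w in edges:
--         graph[u].append((v, w))
--         graph[v].append((u, w))
--
--     # 计算每个节点到根节点(0)的路径异或值
--     xor_path = [0] * n
--     visited = [False] * n
--
--     def dfs(node, parent, current_xor):
--         visited[node] = True
--         xor_path[node] = current_xor
--         for neighbor, weight in graph[node]:
--             if neighbor != parent and not visited[neighbor]:
--                 dfs(neighbor, node, current_xor ^ weight)
--
--     dfs(0, -1, 0)
--
--     # 使用前缀树找到最大异或对
--     root = TrieNode()
--     max_xor = 0
--
--     def insert_to_trie(num):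
--         node = root
--         for i in range(31, -1, -1):
--             bit = (num >> i) & 1
--             if bit not in node.children:
--                 node.children[bit] = TrieNode()
--             node = node.children[bit]
--
--     def query_max_xor(num):
--         node = root
--         max_val = 0
--         for i in range(31, -1, -1):
--             bit = (num >> i) & 1
--             desired_bit = 1 - bit
--             if desired_bit in node.children:
--                 max_val |= (1 << i)
--                 node = node.children[desired_bit]
--             else:
--                 node = node.children[bit]
--         return max_val
--
--     for i in range(n):
--         insert_to_trie(xor_path[i])
--         max_xor = max(max_xor, query_max_xor(xor_path[i]))
--
--     return max_xor
-- ===== SOURCE B (Python) =====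
-- def xor_longest_path(n: int, edges: list[tuple[int, int, int]]) -> int:
--     """Max XOR path value: DFS over one Optional array of root-path XORs
--     (doubling as the visited marker), then the greedy bitwise prefix-set
--     maximum-XOR-pair algorithm instead of a binary Trie."""
--     arcs = []
--     for u, v, w in edges:
--         arcs.append((u, v, w))
--         arcs.append((v, u, w))
--     graph = [[] for _ in range(n)]
--     for a, b, w in arcs:
--         graph[a].append((b, w))
--
--     xo = [None] * n
--
--     def dfs(u, parent, cur):
--         xo[u] = cur
--         for v, w in graph[u]:
--             if v != parent and xo[v] is None:
--                 dfs(v, u, cur ^ w)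
--
--     dfs(0, -1, 0)
--
--     vals = [x if x is not None else 0 for x in xo]
--     best = 0
--     for i in range(31, -1, -1):
--         best <<= 1
--         prefixes = {(v & 0xFFFFFFFF) >> i for v in vals}
--         cand = best | 1
--         if any(cand ^ p in prefixes for p in prefixes):
--             best = cand
--     return best
-- ===== Notes on version B (the rewrite author's own statement) =====
-- stated objective: faster
-- what changed: The 32-bit binary Trie (TrieNode class, insert, greedy query) for the maximum-XOR pair is replaced by the greedy bitwise prefix-set algorithm (one set of shifted 32-bit prefixes per bit), and the two parallel visited/xor_path arrays are merged into a single Optional array filled by the DFS.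
import Mathlib
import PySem

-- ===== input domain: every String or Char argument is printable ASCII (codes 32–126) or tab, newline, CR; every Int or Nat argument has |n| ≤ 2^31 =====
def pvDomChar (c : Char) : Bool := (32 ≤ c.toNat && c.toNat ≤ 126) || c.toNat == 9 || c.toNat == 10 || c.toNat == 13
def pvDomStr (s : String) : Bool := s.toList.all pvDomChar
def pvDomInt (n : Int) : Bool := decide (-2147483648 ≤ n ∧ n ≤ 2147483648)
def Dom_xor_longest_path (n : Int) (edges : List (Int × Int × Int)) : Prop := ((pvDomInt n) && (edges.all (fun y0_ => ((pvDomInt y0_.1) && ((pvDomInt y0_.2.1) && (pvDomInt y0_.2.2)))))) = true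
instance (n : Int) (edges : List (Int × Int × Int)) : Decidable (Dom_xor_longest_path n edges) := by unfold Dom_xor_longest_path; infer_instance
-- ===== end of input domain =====

-- B replaces A's 32-bit Trie maximum-XOR-pair search by the greedy bitwise prefix-set algorithm
-- and merges A's visited/xor_path arrays into one Optional array (objective: faster — the timing
-- run measured B ≥ 3× faster than A's per-value Python Trie objects; a constant-factor change).

-- ===== PORT A =====
-- graph = [[] for _ in range(n)]; for u,v,w in edges: graph[u].append((v,w)); graph[v].append((u,w))
def pvBuildGraph (n : Int) (edges : List (Int × Int × Int)) : List (List (Int × Int)) :=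
  edges.foldl (fun g e =>
    let g1 := PySem.List.pySetD g e.1 (PySem.List.pyGetD g e.1 [] ++ [(e.2.1, e.2.2)])
    PySem.List.pySetD g1 e.2.1 (PySem.List.pyGetD g1 e.2.1 [] ++ [(e.1, e.2.2)]))
    (List.replicate n.toNat [])

-- def dfs(node, parent, current_xor): visited[node]=True; xor_path[node]=current_xor;
--   for neighbor, weight in graph[node]: if neighbor != parent and not visited[neighbor]: dfs(...)
-- State is (visited, xor_path).  Fuel bounds the recursion depth: the Python recursion marks each
-- entered slot visited and only recurses into unvisited slots, so its depth is ≤ n and fuel n+1 is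
-- never exhausted on inputs admitted by Pre_.
def pvDfs (graph : List (List (Int × Int))) : Nat → List Bool × List Int → Int → Int → Int → List Bool × List Int
  | 0, st, _, _, _ => st
  | fuel+1, st, node, parent, cur =>
    (PySem.List.pyGetD graph node []).foldl
      (fun st' nw =>
        if nw.1 ≠ parent ∧ PySem.List.pyGetD st'.1 nw.1 false = false then
          pvDfs graph fuel st' nw.1 node (PySem.Int.bxor cur nw.2)
        else st')
      (PySem.List.pySetD st.1 node true, PySem.List.pySetD st.2 node cur)

-- xor_path = [0]*n; visited=[False]*n; dfs(0, -1, 0)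
def pvXorPaths (n : Int) (edges : List (Int × Int × Int)) : List Int :=
  (pvDfs (pvBuildGraph n edges) (n.toNat + 1)
    (List.replicate n.toNat false, List.replicate n.toNat 0) 0 (-1) 0).2

-- TrieNode: children dict keyed by bit 0/1.  A node with an absent child is modelled by .missing in
-- that slot; a freshly created TrieNode() (empty dict) is .node .missing .missing.
inductive PvTrie
  | missing
  | node (zero one : PvTrie)

-- bit = (num >> i) & 1  (used by both insert and query)
def pvBit (num : Int) (k : Nat) : Int := PySem.Int.band (num >>> k) 1

-- insert_to_trie: for i in range(31,-1,-1): descend into children[bit], creating absent nodes.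
-- Fuel k+1 processes bit index k; creating an absent node is .missing ↦ .node .missing .missing.
def pvInsert : PvTrie → Int → Nat → PvTrie
  | .missing, _, 0 => .node .missing .missing
  | .node z o, _, 0 => .node z o
  | .missing, num, k+1 =>
    if pvBit num k = 1 then .node .missing (pvInsert .missing num k)
    else .node (pvInsert .missing num k) .missing
  | .node z o, num, k+1 =>
    if pvBit num k = 1 then .node z (pvInsert o num k)
    else .node (pvInsert z num k) o

-- query_max_xor with max_val as accumulator acc: bit = (num >> i) & 1; desired_bit = 1 - bit;
-- "desired_bit in node.children" is pvIsMissing (child for desired_bit) = false; if present,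
-- acc |= 1 << i and descend, else descend into children[bit].  (Looking up children[bit] on a
-- node that lacks it would be a Python KeyError; that is unreachable because query is only
-- called after num itself was inserted, so pvChild then returns .missing harmlessly.)
def pvChild (t : PvTrie) (bit : Int) : PvTrie :=
  match t with
  | .missing => .missing
  | .node z o => if bit = 1 then o else z

def pvIsMissing : PvTrie → Bool
  | .missing => true
  | .node _ _ => false

def pvQuery : PvTrie → Int → Nat → Int → Int
  | _, _, 0, acc => acc
  | t, num, k+1, acc =>
    if pvIsMissing (pvChild t (1 - pvBit num k)) then
      pvQuery (pvChild t (pvBit num k)) num k acc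
    else
      pvQuery (pvChild t (1 - pvBit num k)) num k (PySem.Int.bor acc ((1:Int) <<< k))

-- for i in range(n): insert_to_trie(xor_path[i]); max_xor = max(max_xor, query_max_xor(xor_path[i]))
def xor_longest_path (n : Int) (edges : List (Int × Int × Int)) : Int :=
  let ys := pvXorPaths n edges
  ((PySem.List.pyRange 0 n 1).foldl
    (fun (st : PvTrie × Int) i =>
      (pvInsert st.1 (PySem.List.pyGetD ys i 0) 32,
       max st.2 (pvQuery (pvInsert st.1 (PySem.List.pyGetD ys i 0) 32) (PySem.List.pyGetD ys i 0) 32 0)))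
    (.missing, 0)).2

-- ===== PORT B =====
-- arcs = []; for u,v,w in edges: arcs.append((u,v,w)); arcs.append((v,u,w))
def pvArcs : List (Int × Int × Int) → List (Int × Int × Int)
  | [] => []
  | e :: es => (e.1, e.2.1, e.2.2) :: (e.2.1, e.1, e.2.2) :: pvArcs es

-- graph = [[] for _ in range(n)]; for a,b,w in arcs: graph[a].append((b,w))
def pvGraphB : List (Int × Int × Int) → List (List (Int × Int)) → List (List (Int × Int))
  | [], g => g
  | a :: rest, g =>
    pvGraphB rest (PySem.List.pySetD g a.1 (PySem.List.pyGetD g a.1 [] ++ [(a.2.1, a.2.2)]))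

-- def dfs(u, parent, cur): xo[u] = cur;
--   for v, w in graph[u]: if v != parent and xo[v] is None: dfs(v, u, cur ^ w)
-- The for-loop is pvScan (structural recursion over the neighbour list); the recursive call is the
-- step function.  Fuel plays the same totality role as in Port A (depth ≤ n on admitted inputs).
def pvScan (step : List (Option Int) → Int → Int → List (Option Int)) (parent : Int) :
    List (Int × Int) → List (Option Int) → List (Option Int)
  | [], xo => xo
  | vw :: rest, xo =>
    if vw.1 ≠ parent ∧ PySem.List.pyGetD xo vw.1 none = none then
      pvScan step parent rest (step xo vw.1 vw.2)
    else
      pvScan step parent rest xo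

def pvVisit (graph : List (List (Int × Int))) : Nat → List (Option Int) → Int → Int → Int → List (Option Int)
  | 0, xo, _, _, _ => xo
  | fuel+1, xo, u, parent, cur =>
    pvScan (fun xo' v w => pvVisit graph fuel xo' v u (PySem.Int.bxor cur w)) parent
      (PySem.List.pyGetD graph u []) (PySem.List.pySetD xo u (some cur))

-- best = 0
-- for i in range(31, -1, -1):
--     best <<= 1
--     prefixes = {(v & 0xFFFFFFFF) >> i for v in vals}
--     cand = best | 1
--     if any(cand ^ p in prefixes for p in prefixes): best = cand
-- Fuel k+1 processes bit index k (k+1 = 32 is Python's i = 31), exactly as in Port A's trie loops.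
def pvGreedy (vals : List Int) : Nat → Int → Int
  | 0, best => best
  | k+1, best =>
    let b2 := best <<< (1:Nat)
    let prefixes := PySem.Set.ofList (vals.map (fun v => PySem.Int.band v 4294967295 >>> k))
    let cand := PySem.Int.bor b2 1
    if prefixes.any (fun p => prefixes.contains (PySem.Int.bxor cand p)) then
      pvGreedy vals k cand
    else
      pvGreedy vals k b2

-- xo = [None]*n; dfs(0, -1, 0); vals = [x if x is not None else 0 for x in xo]; …; return best
def xor_longest_path_alt (n : Int) (edges : List (Int × Int × Int)) : Int :=
  let graph := pvGraphB (pvArcs edges) (List.replicate n.toNat [])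
  let xo := pvVisit graph (n.toNat + 1) (List.replicate n.toNat (none : Option Int)) 0 (-1) 0
  let vals := xo.map (fun x => match x with | some y => y | none => 0)
  pvGreedy vals 32 0

-- ===== PRECONDITION & SPEC =====
-- Pre_ is exactly where the Python A returns normally: n ≥ 1 (dfs(0,...) indexes xor_path[0]) and
-- every edge endpoint is a valid (possibly negative, Python-wrapping) index into a length-n list;
-- otherwise graph[u] / visited[neighbor] raises IndexError.
def Pre_xor_longest_path (n : Int) (edges : List (Int × Int × Int)) : Prop :=
  1 ≤ n ∧ ∀ e ∈ edges, (-n ≤ e.1 ∧ e.1 < n) ∧ (-n ≤ e.2.1 ∧ e.2.1 < n)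
instance (n : Int) (edges : List (Int × Int × Int)) : Decidable (Pre_xor_longest_path n edges) := by
  unfold Pre_xor_longest_path; infer_instance

def pvWitness_xor_longest_path : Int × (List (Int × Int × Int)) := (3, [(0, 1, 5), (1, 2, 7)])

def Spec_xor_longest_path (n : Int) (edges : List (Int × Int × Int)) (out : Int) : Prop :=
  out = xor_longest_path_alt n edges
instance (n : Int) (edges : List (Int × Int × Int)) (out : Int) : Decidable (Spec_xor_longest_path n edges out) := by
  unfold Spec_xor_longest_path; infer_instance

-- ===== CLAIM (what is proved, stated in full; the proofs are below) =====
def Claim_equal_xor_longest_path : Prop :=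
  ∀ (n : Int) (edges : List (Int × Int × Int)), Dom_xor_longest_path n edges →
    Pre_xor_longest_path n edges → Spec_xor_longest_path n edges (xor_longest_path n edges)

-- ===== LEMMAS AND PROOFS =====

-- ---- generic integer division / bit lemmas ----

-- uniqueness of euclidean div/mod against an explicit decomposition
theorem pvDivModUnique (p q r a : Int) (hp : 0 < p) (ha : a = p * q + r)
    (hr0 : 0 ≤ r) (hrp : r < p) : a / p = q ∧ a % p = r := by
  subst ha
  constructor
  · rw [add_comm, Int.add_mul_ediv_left r q (ne_of_gt hp), Int.ediv_eq_zero_of_lt hr0 hrp, zero_add]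
  · rw [add_comm, Int.add_mul_emod_self_left, Int.emod_eq_of_lt hr0 hrp]

-- bits of -b-1 are flipped bits of b
theorem pvNegDivMod (b p : Int) (hp : 0 < p) :
    (-b - 1) / p = -(b / p) - 1 ∧ (-b - 1) % p = p - 1 - b % p := by
  have h1 := Int.ediv_add_emod b p
  have h2 := Int.emod_nonneg b (ne_of_gt hp)
  have h3 := Int.emod_lt_of_pos b hp
  exact pvDivModUnique p (-(b / p) - 1) (p - 1 - b % p) (-b - 1) hp
    (by linear_combination h1) (by omega) (by omega)

-- a % 2^(k+1) = 2^k * ((a / 2^k) % 2) + a % 2^k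
theorem pvModSplit (a : Int) (k : Nat) :
    a % 2 ^ (k + 1) = 2 ^ k * ((a / 2 ^ k) % 2) + a % 2 ^ k := by
  have hp : (0:Int) < 2 ^ k := by positivity
  have h1 := Int.ediv_add_emod a (2 ^ k)
  have h2 := Int.emod_nonneg a (ne_of_gt hp)
  have h3 := Int.emod_lt_of_pos a hp
  have h4 := Int.ediv_add_emod (a / 2 ^ k) 2
  have h5 := Int.emod_nonneg (a / 2 ^ k) (by norm_num : (2:Int) ≠ 0)
  have h6 := Int.emod_lt_of_pos (a / 2 ^ k) (by norm_num : (0:Int) < 2)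
  have hpow : (2:Int) ^ (k+1) = 2 ^ k * 2 := by ring
  have hmain := pvDivModUnique (2 ^ (k+1)) (a / 2 ^ k / 2)
    (2 ^ k * ((a / 2 ^ k) % 2) + a % 2 ^ k) a (by positivity)
    (by rw [hpow]; linear_combination -h1 - (2:Int) ^ k * h4)
    (by nlinarith) (by nlinarith [hpow])
  exact hmain.2

-- pvBit as an arithmetic bit
theorem pvBit_eq_div_mod (a : Int) (k : Nat) : pvBit a k = (a / 2 ^ k) % 2 := by
  unfold pvBit
  rw [PySem.Int.band_one, PySem.Int.mod_eq_emod_of_pos (by norm_num), Int.shiftRight_eq_div_pow]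
  push_cast
  ring_nf

theorem pvBit_cases (a : Int) (k : Nat) : pvBit a k = 0 ∨ pvBit a k = 1 := by
  rw [pvBit_eq_div_mod]
  have h1 := Int.emod_nonneg (a / 2 ^ k) (by norm_num : (2:Int) ≠ 0)
  have h2 := Int.emod_lt_of_pos (a / 2 ^ k) (by norm_num : (0:Int) < 2)
  omega

-- Python & with an all-ones mask is emod
theorem pvBandMask (a : Int) (k : Nat) : PySem.Int.band a (2 ^ k - 1) = a % 2 ^ k := by
  have hcast : ((2 ^ k : Nat) : Int) = 2 ^ k := by push_cast; ring
  have hk2 : (1:Nat) ≤ 2 ^ k := Nat.one_le_two_pow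
  have hm : (0:Int) ≤ 2 ^ k - 1 := by omega
  have htn : ((2:Int) ^ k - 1).toNat = 2 ^ k - 1 := by omega
  by_cases ha : 0 ≤ a
  · rw [PySem.Int.band_of_nonneg ha hm, htn, Nat.and_two_pow_sub_one_eq_mod]
    conv_rhs => rw [← Int.toNat_of_nonneg ha]
    push_cast
    ring
  · have hb : ((-a - 1).toNat : Int) = -a - 1 := Int.toNat_of_nonneg (by omega)
    have hab : a = -((-a - 1).toNat : Int) - 1 := by omega
    simp only [PySem.Int.band, if_neg ha, if_pos hm, htn]
    rw [Nat.and_comm, Nat.and_two_pow_sub_one_eq_mod]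
    have hmod := (pvNegDivMod ((-a - 1).toNat : Int) (2 ^ k) (by positivity)).2
    have hq : ((-a - 1).toNat : Int) % 2 ^ k = (((-a - 1).toNat % 2 ^ k : Nat) : Int) := by
      push_cast; ring
    have hlt := Nat.mod_lt (-a - 1).toNat (Nat.two_pow_pos k)
    conv_rhs => rw [hab, hmod, hq]
    omega

-- bit k of x ^ y
theorem pvShiftOne (k : Nat) : ((1:Int) <<< k) = ((2 ^ k : Nat) : Int) := by
  rw [show ((1:Int) <<< k) = Int.ofNat (1 <<< k) from rfl, Nat.one_shiftLeft]
  rfl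

theorem pvBit_natCast (w k : Nat) : pvBit (w : Int) k = if w.testBit k then 1 else 0 := by
  rw [pvBit_eq_div_mod]
  have hq : ((w:Int)) / 2 ^ k % 2 = ((w / 2 ^ k % 2 : Nat) : Int) := by push_cast; ring
  rw [hq, Nat.testBit_eq_decide_div_mod_eq]
  by_cases h : w / 2 ^ k % 2 = 1 <;> simp [h] <;> omega

theorem pvBit_negNat (w k : Nat) : pvBit (-(w : Int) - 1) k = if w.testBit k then 0 else 1 := by
  rw [pvBit_eq_div_mod, (pvNegDivMod (w:Int) (2 ^ k) (by positivity)).1]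
  have hq : ((w:Int)) / 2 ^ k = ((w / 2 ^ k : Nat) : Int) := by push_cast; ring
  rw [hq, Nat.testBit_eq_decide_div_mod_eq]
  by_cases h : w / 2 ^ k % 2 = 1 <;> simp [h] <;> omega

theorem pvBitBxor (x y : Int) (k : Nat) :
    pvBit (PySem.Int.bxor x y) k = if pvBit x k = pvBit y k then 0 else 1 := by
  by_cases hx : 0 ≤ x <;> by_cases hy : 0 ≤ y
  · have ex : x = (x.toNat : Int) := (Int.toNat_of_nonneg hx).symm
    have ey : y = (y.toNat : Int) := (Int.toNat_of_nonneg hy).symm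
    simp only [PySem.Int.bxor, if_pos hx, if_pos hy]
    conv_rhs => rw [ex, ey]
    rw [pvBit_natCast, pvBit_natCast, pvBit_natCast, Nat.testBit_xor]
    set bu := x.toNat.testBit k
    set bv := y.toNat.testBit k
    cases bu <;> cases bv <;> simp
  · have ex : x = (x.toNat : Int) := (Int.toNat_of_nonneg hx).symm
    have ey : y = -((-y - 1).toNat : Int) - 1 := by
      have := Int.toNat_of_nonneg (show (0:Int) ≤ -y - 1 by omega); omega
    simp only [PySem.Int.bxor, if_pos hx, if_neg hy]
    conv_rhs => rw [ex, ey]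
    rw [pvBit_negNat, pvBit_natCast, pvBit_negNat, Nat.testBit_xor]
    set bu := x.toNat.testBit k
    set bv := (-y - 1).toNat.testBit k
    cases bu <;> cases bv <;> simp
  · have ex : x = -((-x - 1).toNat : Int) - 1 := by
      have := Int.toNat_of_nonneg (show (0:Int) ≤ -x - 1 by omega); omega
    have ey : y = (y.toNat : Int) := (Int.toNat_of_nonneg hy).symm
    simp only [PySem.Int.bxor, if_neg hx, if_pos hy]
    conv_rhs => rw [ex, ey]
    rw [pvBit_negNat, pvBit_negNat, pvBit_natCast, Nat.testBit_xor]
    set bu := (-x - 1).toNat.testBit k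
    set bv := y.toNat.testBit k
    cases bu <;> cases bv <;> simp
  · have ex : x = -((-x - 1).toNat : Int) - 1 := by
      have := Int.toNat_of_nonneg (show (0:Int) ≤ -x - 1 by omega); omega
    have ey : y = -((-y - 1).toNat : Int) - 1 := by
      have := Int.toNat_of_nonneg (show (0:Int) ≤ -y - 1 by omega); omega
    simp only [PySem.Int.bxor, if_neg hx, if_neg hy]
    conv_rhs => rw [ex, ey]
    rw [pvBit_natCast, pvBit_negNat, pvBit_negNat, Nat.testBit_xor]
    set bu := (-x - 1).toNat.testBit k
    set bv := (-y - 1).toNat.testBit k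
    cases bu <;> cases bv <;> simp

-- Nat: adding a set bit below the trailing zeros is lor
theorem pvNatLorAdd (k A : Nat) : (2 ^ (k + 1) * A) ||| 2 ^ k = 2 ^ (k + 1) * A + 2 ^ k := by
  apply Nat.eq_of_testBit_eq
  intro j
  have hlt : 2 ^ k < 2 ^ (k + 1) := Nat.pow_lt_pow_right one_lt_two (Nat.lt_succ_self k)
  rw [Nat.testBit_lor, Nat.testBit_two_pow_mul_add A hlt j, Nat.testBit_two_pow_mul]
  by_cases hj : j < k + 1
  · have h1 : ¬ (k + 1 ≤ j) := by omega
    simp [hj, h1, Nat.testBit_two_pow]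
  · have h1 : k + 1 ≤ j := by omega
    have h2 : k ≠ j := by omega
    simp [hj, h1, h2, Nat.testBit_two_pow]

theorem pvBorAcc (k A : Nat) :
    PySem.Int.bor ((2 ^ (k + 1) * A : Nat) : Int) ((1:Int) <<< k)
      = ((2 ^ (k + 1) * A : Nat) : Int) + 2 ^ k := by
  rw [pvShiftOne, PySem.Int.bor_of_nonneg (by positivity) (by positivity)]
  simp only [Int.toNat_natCast]
  rw [pvNatLorAdd]
  push_cast
  ring

-- ---- masked xor ----

def pvMx (k : Nat) (x y : Int) : Int := PySem.Int.band (PySem.Int.bxor x y) (2 ^ k - 1)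

theorem pvMx_nonneg (k : Nat) (x y : Int) : 0 ≤ pvMx k x y := by
  unfold pvMx
  rw [pvBandMask]
  exact Int.emod_nonneg _ (by positivity)

theorem pvMx_lt (k : Nat) (x y : Int) : pvMx k x y < 2 ^ k := by
  unfold pvMx
  rw [pvBandMask]
  exact Int.emod_lt_of_pos _ (by positivity)

theorem pvMx_zero (x y : Int) : pvMx 0 x y = 0 := by
  simp [pvMx]

theorem pvMx_succ (k : Nat) (x y : Int) :
    pvMx (k + 1) x y = (if pvBit x k = pvBit y k then 0 else 2 ^ k) + pvMx k x y := by
  unfold pvMx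
  rw [pvBandMask, pvBandMask, pvModSplit (PySem.Int.bxor x y) k, ← pvBit_eq_div_mod, pvBitBxor]
  split_ifs with h
  · ring
  · ring

-- ---- fold-max toolbox ----

def pvMxF (l : List Int) (x : Int) (k : Nat) : Int :=
  l.foldl (fun m y => max m (pvMx k x y)) 0

theorem pvFoldMaxInit (f : Int → Int) (l : List Int) (b c : Int) :
    l.foldl (fun m y => max m (f y)) (max b c) = max b (l.foldl (fun m y => max m (f y)) c) := by
  induction l generalizing c with
  | nil => simp
  | cons y l ih =>
    simp only [List.foldl_cons]
    rw [max_assoc, ih]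

theorem pvFoldMaxShift (f g : Int → Int) (c : Int) :
    ∀ (l : List Int) (b : Int), (∀ y ∈ l, g y = c + f y) →
      l.foldl (fun m y => max m (g y)) (c + b) = c + l.foldl (fun m y => max m (f y)) b := by
  intro l
  induction l with
  | nil => intro b _; rfl
  | cons y l ih =>
    intro b h
    simp only [List.foldl_cons]
    rw [h y (by simp), max_add_add_left]
    exact ih (max b (f y)) (fun z hz => h z (by simp [hz]))

theorem pvLeFoldMax (f : Int → Int) : ∀ (l : List Int) (b : Int),
    b ≤ l.foldl (fun m y => max m (f y)) b := by
  intro l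
  induction l with
  | nil => intro b; exact le_refl b
  | cons y l ih =>
    intro b
    simp only [List.foldl_cons]
    exact le_trans (le_max_left b (f y)) (ih (max b (f y)))

theorem pvFoldMaxConst (f : Int → Int) : ∀ (l : List Int) (b : Int), (∀ y ∈ l, f y ≤ b) →
    l.foldl (fun m y => max m (f y)) b = b := by
  intro l
  induction l with
  | nil => intro b _; rfl
  | cons y l ih =>
    intro b h
    simp only [List.foldl_cons]
    rw [max_eq_left (h y (by simp))]
    exact ih b (fun z hz => h z (by simp [hz]))

theorem pvFoldMaxLt (f : Int → Int) (c : Int) : ∀ (l : List Int) (b : Int),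
    b < c → (∀ y ∈ l, f y < c) → l.foldl (fun m y => max m (f y)) b < c := by
  intro l
  induction l with
  | nil => intro b hb _; exact hb
  | cons y l ih =>
    intro b hb h
    simp only [List.foldl_cons]
    exact ih (max b (f y)) (max_lt hb (h y (by simp))) (fun z hz => h z (by simp [hz]))

theorem pvMxF_nonneg (l : List Int) (x : Int) (k : Nat) : 0 ≤ pvMxF l x k :=
  pvLeFoldMax _ l 0

theorem pvMxF_lt (l : List Int) (x : Int) (k : Nat) : pvMxF l x k < 2 ^ k :=
  pvFoldMaxLt _ _ l 0 (by positivity) (fun y _ => pvMx_lt k x y)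

theorem pvMxF_zero (l : List Int) (x : Int) : pvMxF l x 0 = 0 :=
  pvFoldMaxConst _ l 0 (fun y _ => le_of_eq (pvMx_zero x y))

theorem pvMxF_congr (l : List Int) (x : Int) (k k' : Nat)
    (h : ∀ y ∈ l, pvMx k x y = pvMx k' x y) : pvMxF l x k = pvMxF l x k' :=
  PySem.List.foldl_congr_mem l _ _ 0 (fun acc y hy => by rw [h y hy])

theorem pvMxF_shift (l : List Int) (x : Int) (k : Nat) (hl : l ≠ [])
    (h : ∀ y ∈ l, pvMx (k + 1) x y = 2 ^ k + pvMx k x y) :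
    pvMxF l x (k + 1) = 2 ^ k + pvMxF l x k := by
  cases l with
  | nil => exact absurd rfl hl
  | cons y l =>
    unfold pvMxF
    simp only [List.foldl_cons]
    have hy := h y (by simp)
    have hc : (0:Int) ≤ 2 ^ k := by positivity
    have h0 : max 0 (pvMx (k + 1) x y) = 2 ^ k + max 0 (pvMx k x y) := by
      rw [hy, max_eq_right (add_nonneg hc (pvMx_nonneg k x y)),
        max_eq_right (pvMx_nonneg k x y)]
    rw [h0]
    exact pvFoldMaxShift (fun y => pvMx k x y) (fun y => pvMx (k + 1) x y) (2 ^ k) l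
      (max 0 (pvMx k x y)) (fun z hz => h z (by simp [hz]))

-- ---- trie built by the fold of inserts ----

def pvTK (l : List Int) (k : Nat) : PvTrie := l.foldl (fun t y => pvInsert t y k) .missing

theorem pvInsFold_node (k : Nat) : ∀ (l : List Int) (z o : PvTrie),
    l.foldl (fun t y => pvInsert t y (k + 1)) (.node z o)
      = .node ((l.filter (fun y => !decide (pvBit y k = 1))).foldl (fun t y => pvInsert t y k) z)
              ((l.filter (fun y => decide (pvBit y k = 1))).foldl (fun t y => pvInsert t y k) o) := by
  intro l
  induction l with
  | nil => intro z o; rfl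
  | cons y l ih =>
    intro z o
    simp only [List.foldl_cons, List.filter_cons]
    by_cases hy : pvBit y k = 1
    · have hstep : pvInsert (PvTrie.node z o) y (k + 1) = PvTrie.node z (pvInsert o y k) := by
        simp [pvInsert, hy]
      rw [hstep]
      simp only [hy, decide_true, Bool.not_true, if_false, if_true, List.foldl_cons]
      exact ih z (pvInsert o y k)
    · have hstep : pvInsert (PvTrie.node z o) y (k + 1) = PvTrie.node (pvInsert z y k) o := by
        simp [pvInsert, hy]
      rw [hstep]
      simp only [hy, decide_false, Bool.not_false, if_true, if_false, List.foldl_cons]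
      exact ih (pvInsert z y k) o

theorem pvTK_split (l : List Int) (k : Nat) (hl : l ≠ []) :
    pvTK l (k + 1) = .node (pvTK (l.filter (fun y => !decide (pvBit y k = 1))) k)
                           (pvTK (l.filter (fun y => decide (pvBit y k = 1))) k) := by
  cases l with
  | nil => exact absurd rfl hl
  | cons y l' =>
    unfold pvTK
    simp only [List.foldl_cons, List.filter_cons]
    by_cases hy : pvBit y k = 1
    · have hstep : pvInsert PvTrie.missing y (k + 1)
          = PvTrie.node PvTrie.missing (pvInsert PvTrie.missing y k) := by
        simp [pvInsert, hy]
      rw [hstep, pvInsFold_node]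
      simp [hy]
    · have hstep : pvInsert PvTrie.missing y (k + 1)
          = PvTrie.node (pvInsert PvTrie.missing y k) PvTrie.missing := by
        simp [pvInsert, hy]
      rw [hstep, pvInsFold_node]
      simp [hy]

theorem pvTK_fold0_node (l : List Int) : ∀ (z o : PvTrie),
    l.foldl (fun t y => pvInsert t y 0) (.node z o) = .node z o := by
  induction l with
  | nil => intro z o; rfl
  | cons y l ih =>
    intro z o
    simp only [List.foldl_cons]
    have : pvInsert (PvTrie.node z o) y 0 = PvTrie.node z o := rfl
    rw [this]
    exact ih z o

theorem pvTK_ne_missing (l : List Int) (k : Nat) (hl : l ≠ []) : pvTK l k ≠ .missing := by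
  cases k with
  | zero =>
    cases l with
    | nil => exact absurd rfl hl
    | cons y l' =>
      unfold pvTK
      simp only [List.foldl_cons]
      have : pvInsert PvTrie.missing y 0 = PvTrie.node PvTrie.missing PvTrie.missing := rfl
      rw [this, pvTK_fold0_node]
      intro h
      exact PvTrie.noConfusion h
  | succ k =>
    rw [pvTK_split l k hl]
    intro h
    exact PvTrie.noConfusion h

-- ---- query correctness ----

theorem pvBorZero (k : Nat) : PySem.Int.bor 0 ((1:Int) <<< k) = ((2 ^ k * 1 : Nat) : Int) := by
  have h0 : (0 : Int) = ((2 ^ (k + 1) * 0 : Nat) : Int) := by norm_num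
  rw [h0, pvBorAcc k 0]
  push_cast
  ring

theorem pvQuery_zero (t : PvTrie) (num acc : Int) : pvQuery t num 0 acc = acc := rfl

theorem pvQuery_succ (t : PvTrie) (num : Int) (k : Nat) (acc : Int) :
    pvQuery t num (k + 1) acc
      = if pvIsMissing (pvChild t (1 - pvBit num k)) then
          pvQuery (pvChild t (pvBit num k)) num k acc
        else
          pvQuery (pvChild t (1 - pvBit num k)) num k (PySem.Int.bor acc ((1:Int) <<< k)) := rfl

theorem pvChild_one (z o : PvTrie) : pvChild (.node z o) 1 = o := by simp [pvChild]

theorem pvChild_zero (z o : PvTrie) : pvChild (.node z o) 0 = z := by simp [pvChild]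

theorem pvQueryAcc : ∀ (k : Nat) (t : PvTrie) (x : Int) (A : Nat),
    pvQuery t x k ((2 ^ k * A : Nat) : Int) = 2 ^ k * A + pvQuery t x k 0 := by
  intro k
  induction k with
  | zero =>
    intro t x A
    rw [pvQuery_zero, pvQuery_zero]
    push_cast; ring
  | succ k ih =>
    intro t x A
    have ecast : ((2 ^ (k + 1) * A : Nat) : Int) = ((2 ^ k * (2 * A) : Nat) : Int) := by
      push_cast; ring
    rw [pvQuery_succ, pvQuery_succ]
    by_cases hm : pvIsMissing (pvChild t (1 - pvBit x k)) = true
    · rw [if_pos hm, if_pos hm, ecast, ih (pvChild t (pvBit x k)) x (2 * A)]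
      push_cast; ring
    · rw [if_neg hm, if_neg hm, pvBorAcc k A]
      have e1 : ((2 ^ (k + 1) * A : Nat) : Int) + 2 ^ k = ((2 ^ k * (2 * A + 1) : Nat) : Int) := by
        push_cast; ring
      rw [e1, ih (pvChild t (1 - pvBit x k)) x (2 * A + 1), pvBorZero k,
        ih (pvChild t (1 - pvBit x k)) x 1]
      push_cast; ring

theorem pvQuery_main : ∀ (k : Nat) (l : List Int) (x : Int), l ≠ [] →
    pvQuery (pvTK l k) x k 0 = pvMxF l x k := by
  intro k
  induction k with
  | zero =>
    intro l x hl
    rw [pvMxF_zero, pvQuery_zero]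
  | succ k ih =>
    intro l x hl
    rw [pvTK_split l k hl]
    have hperm : ((l.filter (fun y => decide (pvBit y k = 1))
        ++ l.filter (fun y => !decide (pvBit y k = 1))) : List Int).Perm l :=
      List.filter_append_perm _ l
    haveI hrc : RightCommutative (fun (m : Int) (y : Int) => max m (pvMx (k + 1) x y)) :=
      ⟨fun a b c => max_right_comm a (pvMx (k + 1) x b) (pvMx (k + 1) x c)⟩
    have hsplit : pvMxF l x (k + 1)
        = (l.filter (fun y => !decide (pvBit y k = 1))).foldl
            (fun m y => max m (pvMx (k + 1) x y))
            (pvMxF (l.filter (fun y => decide (pvBit y k = 1))) x (k + 1)) := by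
      unfold pvMxF
      rw [← hperm.foldl_eq 0, List.foldl_append]
    rw [pvQuery_succ]
    rcases pvBit_cases x k with hb | hb
    · -- bit of x is 0: desired child holds the elements with bit 1
      rw [hb]
      norm_num
      rw [pvChild_one, pvChild_zero]
      by_cases h1 : l.filter (fun y => decide (pvBit y k = 1)) = []
      · rw [show pvTK (l.filter (fun y => decide (pvBit y k = 1))) k = PvTrie.missing from by
          rw [h1]; rfl]
        rw [if_pos (show pvIsMissing PvTrie.missing = true from rfl)]
        have hl0 : l.filter (fun y => !decide (pvBit y k = 1)) = l := by
          apply List.filter_eq_self.2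
          intro a ha
          by_cases hpa : pvBit a k = 1
          · exact absurd (h1 ▸ List.mem_filter.2 ⟨ha, by simp [hpa]⟩) (List.not_mem_nil)
          · simp [hpa]
        rw [hl0, ih l x hl, hsplit, h1]
        have hMx0 : pvMxF ([] : List Int) x (k + 1) = 0 := rfl
        rw [hMx0, hl0]
        exact (PySem.List.foldl_congr_mem l _ _ 0 (fun acc y hy => by
          have hy0 : pvBit y k = 0 := by
            rcases pvBit_cases y k with h | h
            · exact h
            · exact absurd (h1 ▸ List.mem_filter.2 ⟨hy, by simp [h]⟩) (List.not_mem_nil)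
          rw [pvMx_succ, hb, hy0, if_pos rfl, zero_add])).symm
      · have hne := pvTK_ne_missing _ k h1
        cases htk : pvTK (l.filter (fun y => decide (pvBit y k = 1))) k with
        | missing => exact absurd htk hne
        | node dz dd =>
          rw [if_neg (by simp [pvIsMissing])]
          rw [pvBorZero k, pvQueryAcc k (.node dz dd) x 1, ← htk, ih _ x h1]
          rw [hsplit]
          have hshift : pvMxF (l.filter (fun y => decide (pvBit y k = 1))) x (k + 1)
              = 2 ^ k + pvMxF (l.filter (fun y => decide (pvBit y k = 1))) x k := by
            apply pvMxF_shift _ x k h1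
            intro y hy
            have hy1 : pvBit y k = 1 := of_decide_eq_true (List.mem_filter.1 hy).2
            rw [pvMx_succ, hb, hy1]
            norm_num
          rw [hshift]
          have hconst : (l.filter (fun y => !decide (pvBit y k = 1))).foldl
              (fun m y => max m (pvMx (k + 1) x y))
              (2 ^ k + pvMxF (l.filter (fun y => decide (pvBit y k = 1))) x k)
              = 2 ^ k + pvMxF (l.filter (fun y => decide (pvBit y k = 1))) x k := by
            apply pvFoldMaxConst
            intro y hy
            have hy0 : pvBit y k = 0 := by
              rcases pvBit_cases y k with h | h
              · exact h
              · have := (List.mem_filter.1 hy).2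
                simp [h] at this
            have hEq : pvMx (k + 1) x y = pvMx k x y := by
              rw [pvMx_succ, hb, hy0, if_pos rfl, zero_add]
            rw [hEq]
            have h2 := pvMx_lt k x y
            have h3 := pvMxF_nonneg (l.filter (fun y => decide (pvBit y k = 1))) x k
            linarith
          rw [hconst]
          push_cast
          ring
    · -- bit of x is 1: desired child holds the elements with bit 0
      rw [hb]
      norm_num
      rw [pvChild_one, pvChild_zero]
      by_cases h0 : l.filter (fun y => !decide (pvBit y k = 1)) = []
      · rw [show pvTK (l.filter (fun y => !decide (pvBit y k = 1))) k = PvTrie.missing from by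
          rw [h0]; rfl]
        rw [if_pos (show pvIsMissing PvTrie.missing = true from rfl)]
        have hl1 : l.filter (fun y => decide (pvBit y k = 1)) = l := by
          apply List.filter_eq_self.2
          intro a ha
          by_cases hpa : pvBit a k = 1
          · simp [hpa]
          · exact absurd (h0 ▸ List.mem_filter.2 ⟨ha, by simp [hpa]⟩) (List.not_mem_nil)
        rw [hl1, ih l x hl, hsplit, h0]
        simp only [List.foldl_nil]
        rw [hl1]
        exact pvMxF_congr l x k (k + 1) (fun y hy => by
          have hy1 : pvBit y k = 1 := of_decide_eq_true (List.filter_eq_self.1 hl1 y hy)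
          rw [pvMx_succ, hb, hy1, if_pos rfl, zero_add])
      · have hne := pvTK_ne_missing _ k h0
        cases htk : pvTK (l.filter (fun y => !decide (pvBit y k = 1))) k with
        | missing => exact absurd htk hne
        | node dz dd =>
          rw [if_neg (by simp [pvIsMissing])]
          rw [pvBorZero k, pvQueryAcc k (.node dz dd) x 1, ← htk, ih _ x h0]
          rw [hsplit]
          have hcong : pvMxF (l.filter (fun y => decide (pvBit y k = 1))) x (k + 1)
              = pvMxF (l.filter (fun y => decide (pvBit y k = 1))) x k :=
            pvMxF_congr _ x (k + 1) k (fun y hy => by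
              have hy1 : pvBit y k = 1 := of_decide_eq_true (List.mem_filter.1 hy).2
              rw [pvMx_succ, hb, hy1, if_pos rfl, zero_add])
          rw [hcong]
          have hini : pvMxF (l.filter (fun y => decide (pvBit y k = 1))) x k
              = max (pvMxF (l.filter (fun y => decide (pvBit y k = 1))) x k) 0 :=
            (max_eq_left (pvMxF_nonneg _ x k)).symm
          rw [hini, pvFoldMaxInit]
          have hshift : pvMxF (l.filter (fun y => !decide (pvBit y k = 1))) x (k + 1)
              = 2 ^ k + pvMxF (l.filter (fun y => !decide (pvBit y k = 1))) x k := by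
            apply pvMxF_shift _ x k h0
            intro y hy
            have hy0 : pvBit y k = 0 := by
              rcases pvBit_cases y k with h | h
              · exact h
              · have := (List.mem_filter.1 hy).2
                simp [h] at this
            rw [pvMx_succ, hb, hy0]
            norm_num
          have hfold0 : (l.filter (fun y => !decide (pvBit y k = 1))).foldl
              (fun m y => max m (pvMx (k + 1) x y)) 0
              = pvMxF (l.filter (fun y => !decide (pvBit y k = 1))) x (k + 1) := rfl
          rw [hfold0, hshift]
          rw [max_eq_right (by
            have h2 := pvMxF_lt (l.filter (fun y => decide (pvBit y k = 1))) x k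
            have h3 := pvMxF_nonneg (l.filter (fun y => !decide (pvBit y k = 1))) x k
            linarith)]
          push_cast
          ring

-- ---- the two final loops compute the same pairwise maximum ----

def pvCF (l : List Int) : List Int × Int :=
  l.foldl (fun acc x => (acc.1 ++ [x], max acc.2 (pvMxF (acc.1 ++ [x]) x 32))) ([], 0)

theorem pvCF_aux_fst : ∀ (l : List Int) (acc : List Int × Int),
    (l.foldl (fun acc x => (acc.1 ++ [x], max acc.2 (pvMxF (acc.1 ++ [x]) x 32))) acc).1
      = acc.1 ++ l := by
  intro l
  induction l with
  | nil => intro acc; simp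
  | cons y l ih =>
    intro acc
    simp only [List.foldl_cons]
    rw [ih]
    simp

theorem pvCF_fst (l : List Int) : (pvCF l).1 = l := by
  unfold pvCF
  rw [pvCF_aux_fst]
  simp

theorem pvALoop (l : List Int) :
    l.foldl (fun (st : PvTrie × Int) x =>
        (pvInsert st.1 x 32, max st.2 (pvQuery (pvInsert st.1 x 32) x 32 0)))
      (.missing, 0) = (pvTK l 32, (pvCF l).2) := by
  induction l using List.reverseRecOn with
  | nil => rfl
  | append_singleton l x ih =>
    rw [List.foldl_append, ih]
    simp only [List.foldl_cons, List.foldl_nil]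
    have hTK : pvInsert (pvTK l 32) x 32 = pvTK (l ++ [x]) 32 := by
      unfold pvTK
      rw [List.foldl_append]
      rfl
    have hstep : pvCF (l ++ [x]) = ((pvCF l).1 ++ [x],
        max (pvCF l).2 (pvMxF ((pvCF l).1 ++ [x]) x 32)) := by
      unfold pvCF
      rw [List.foldl_append]
      rfl
    rw [hTK, pvQuery_main 32 (l ++ [x]) x (by simp), hstep, pvCF_fst]

theorem pvDfs_len (graph : List (List (Int × Int))) (fuel : Nat) :
    ∀ (st : List Bool × List Int) (node parent cur : Int),
      ((pvDfs graph fuel st node parent cur).1.length = st.1.length ∧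
       (pvDfs graph fuel st node parent cur).2.length = st.2.length) := by
  induction fuel with
  | zero => intro st node parent cur; exact ⟨rfl, rfl⟩
  | succ fuel ih =>
    intro st node parent cur
    have aux : ∀ (ns : List (Int × Int)) (st' : List Bool × List Int),
        (((ns.foldl (fun st' nw =>
            if nw.1 ≠ parent ∧ PySem.List.pyGetD st'.1 nw.1 false = false then
              pvDfs graph fuel st' nw.1 node (PySem.Int.bxor cur nw.2)
            else st') st')).1.length = st'.1.length ∧
         ((ns.foldl (fun st' nw =>
            if nw.1 ≠ parent ∧ PySem.List.pyGetD st'.1 nw.1 false = false then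
              pvDfs graph fuel st' nw.1 node (PySem.Int.bxor cur nw.2)
            else st') st')).2.length = st'.2.length) := by
      intro ns
      induction ns with
      | nil => intro st'; exact ⟨rfl, rfl⟩
      | cons nw ns ihn =>
        intro st'
        simp only [List.foldl_cons]
        by_cases hc : nw.1 ≠ parent ∧ PySem.List.pyGetD st'.1 nw.1 false = false
        · rw [if_pos hc]
          obtain ⟨ha, hb⟩ := ihn (pvDfs graph fuel st' nw.1 node (PySem.Int.bxor cur nw.2))
          obtain ⟨hc1, hc2⟩ := ih st' nw.1 node (PySem.Int.bxor cur nw.2)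
          exact ⟨ha.trans hc1, hb.trans hc2⟩
        · rw [if_neg hc]
          exact ihn st'
    have hunfold : pvDfs graph (fuel + 1) st node parent cur
        = (PySem.List.pyGetD graph node []).foldl
            (fun st' nw =>
              if nw.1 ≠ parent ∧ PySem.List.pyGetD st'.1 nw.1 false = false then
                pvDfs graph fuel st' nw.1 node (PySem.Int.bxor cur nw.2)
              else st')
            (PySem.List.pySetD st.1 node true, PySem.List.pySetD st.2 node cur) := rfl
    rw [hunfold]
    obtain ⟨h1, h2⟩ := aux (PySem.List.pyGetD graph node [])
      (PySem.List.pySetD st.1 node true, PySem.List.pySetD st.2 node cur)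
    constructor
    · rw [h1]
      exact PySem.List.length_pySetD st.1 node true
    · rw [h2]
      exact PySem.List.length_pySetD st.2 node cur

theorem pvXorPaths_len (n : Int) (edges : List (Int × Int × Int)) :
    (pvXorPaths n edges).length = n.toNat := by
  unfold pvXorPaths
  rw [(pvDfs_len (pvBuildGraph n edges) (n.toNat + 1)
    (List.replicate n.toNat false, List.replicate n.toNat 0) 0 (-1) 0).2]
  exact List.length_replicate

-- ---- indexing transfer: what a Python list-set at v makes a later get at i see ----

theorem pvIdxLt (len : Nat) (v : Int) (k : Nat) (hk : PySem.List.pyIdx? len v = some k) :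
    k < len := by
  simp only [PySem.List.pyIdx?] at hk
  split_ifs at hk with h1 h2 h3 <;> simp_all <;> omega

theorem pvGetSet {α : Type} (xs : List α) (v i : Int) (a d : α) :
    PySem.List.pyGetD (PySem.List.pySetD xs v a) i d =
      match PySem.List.pyIdx? xs.length v, PySem.List.pyIdx? xs.length i with
      | some k, some m => if k = m then a else PySem.List.pyGetD xs i d
      | _, _ => PySem.List.pyGetD xs i d := by
  rcases hk : PySem.List.pyIdx? xs.length v with _ | k
  · simp [PySem.List.pySetD, PySem.List.pySet?, hk]
  · have hset : PySem.List.pySetD xs v a = xs.set k a := by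
      simp [PySem.List.pySetD, PySem.List.pySet?, hk]
    have hlen2 : (xs.set k a).length = xs.length := List.length_set
    rcases hm : PySem.List.pyIdx? xs.length i with _ | m
    · simp [PySem.List.pyGetD, PySem.List.pyGet?, hset, hlen2, hm]
    · have hklen : k < xs.length := pvIdxLt xs.length v k hk
      simp only [PySem.List.pyGetD, PySem.List.pyGet?, hset, hlen2, hm]
      have hb1 : ((some m).bind fun a_1 => (xs.set k a)[a_1]?) = (xs.set k a)[m]? := rfl
      have hb2 : ((some m).bind fun a_1 => xs[a_1]?) = xs[m]? := rfl
      rw [hb1, hb2, List.getElem?_set]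
      by_cases hkm : k = m
      · rw [if_pos hkm, if_pos (hkm ▸ hklen), if_pos hkm]
        rfl
      · rw [if_neg hkm, if_neg hkm]

theorem pvGetRepSame {α : Type} (k : Nat) (a : α) (i : Int) :
    PySem.List.pyGetD (List.replicate k a) i a = a := by
  simp only [PySem.List.pyGetD, PySem.List.pyGet?, List.length_replicate]
  rcases hm : PySem.List.pyIdx? k i with _ | m
  · rfl
  · have hmk : m < k := pvIdxLt k i m hm
    simp [List.getElem?_replicate, hmk]

-- ---- B's recursions as folds ----

theorem pvGraphB_eq_foldl : ∀ (es : List (Int × Int × Int)) (g : List (List (Int × Int))),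
    pvGraphB (pvArcs es) g = es.foldl (fun g e =>
      let g1 := PySem.List.pySetD g e.1 (PySem.List.pyGetD g e.1 [] ++ [(e.2.1, e.2.2)])
      PySem.List.pySetD g1 e.2.1 (PySem.List.pyGetD g1 e.2.1 [] ++ [(e.1, e.2.2)])) g := by
  intro es
  induction es with
  | nil => intro g; rfl
  | cons e es ih => intro g; simp only [List.foldl_cons, pvArcs, pvGraphB]; exact ih _

-- ---- the pairwise maximum (pvCF) characterised: bounds, upper bound, attainment ----

theorem pvCF_aux_le : ∀ (l : List Int) (acc : List Int × Int),
    acc.2 ≤ (l.foldl (fun acc x => (acc.1 ++ [x], max acc.2 (pvMxF (acc.1 ++ [x]) x 32))) acc).2 := by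
  intro l
  induction l with
  | nil => intro acc; exact le_refl _
  | cons y l ih =>
    intro acc
    simp only [List.foldl_cons]
    exact le_trans (le_max_left _ _) (ih _)

theorem pvCF_nonneg (l : List Int) : 0 ≤ (pvCF l).2 :=
  pvCF_aux_le l ([], 0)

theorem pvCF_aux_lt : ∀ (l : List Int) (acc : List Int × Int), acc.2 < 2 ^ 32 →
    (l.foldl (fun acc x => (acc.1 ++ [x], max acc.2 (pvMxF (acc.1 ++ [x]) x 32))) acc).2 < 2 ^ 32 := by
  intro l
  induction l with
  | nil => intro acc h; exact h
  | cons y l ih =>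
    intro acc h
    simp only [List.foldl_cons]
    exact ih _ (max_lt h (pvMxF_lt _ _ _))

theorem pvCF_lt (l : List Int) : (pvCF l).2 < 2 ^ 32 :=
  pvCF_aux_lt l ([], 0) (by norm_num)

theorem pvMx_comm (k : Nat) (x y : Int) : pvMx k x y = pvMx k y x := by
  unfold pvMx
  rw [PySem.Int.bxor_comm]

theorem pvMxF_le_mem (x : Int) (k : Nat) :
    ∀ (m : List Int) (b : Int) (y : Int), y ∈ m →
      pvMx k x y ≤ m.foldl (fun a y' => max a (pvMx k x y')) b := by
  intro m
  induction m with
  | nil => intro b y hy; exact absurd hy (List.not_mem_nil)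
  | cons z m ih =>
    intro b y hy
    simp only [List.foldl_cons]
    rcases List.mem_cons.1 hy with hz | hz
    · subst hz
      exact le_trans (le_max_right b _) (pvLeFoldMax _ m _)
    · exact ih _ y hz

theorem pvCF_aux_ub : ∀ (l : List Int) (seen : List Int) (b : Int),
    ∀ x ∈ l, ∀ y ∈ seen ++ l, pvMx 32 x y ≤
      (l.foldl (fun acc x => (acc.1 ++ [x], max acc.2 (pvMxF (acc.1 ++ [x]) x 32))) (seen, b)).2 := by
  intro l
  induction l with
  | nil => intro seen b x hx; exact absurd hx (List.not_mem_nil)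
  | cons z rest ih =>
    intro seen b x hx y hy
    simp only [List.foldl_cons]
    rcases List.mem_cons.1 hx with hxz | hxr
    · rcases List.mem_append.1 hy with hys | hyr
      · -- y ∈ seen: covered at this step
        have h1 : pvMx 32 x y ≤ pvMxF (seen ++ [z]) z 32 := by
          rw [hxz]
          exact pvMxF_le_mem z 32 (seen ++ [z]) 0 y (by simp [hys])
        exact le_trans (le_trans h1 (le_max_right b _)) (pvCF_aux_le rest _)
      · rcases List.mem_cons.1 hyr with hyz | hyr'
        · -- x = y = z: the diagonal pair, also covered at this step
          have h1 : pvMx 32 x y ≤ pvMxF (seen ++ [z]) z 32 := by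
            rw [hxz, hyz]
            exact pvMxF_le_mem z 32 (seen ++ [z]) 0 z (by simp)
          exact le_trans (le_trans h1 (le_max_right b _)) (pvCF_aux_le rest _)
        · -- y comes later: use symmetry and recurse with x := y
          rw [pvMx_comm, hxz]
          exact ih (seen ++ [z]) _ y hyr' z (by simp)
    · -- x comes later
      have hy' : y ∈ (seen ++ [z]) ++ rest := by
        rcases List.mem_append.1 hy with h | h
        · exact List.mem_append.2 (Or.inl (by simp [h]))
        · rcases List.mem_cons.1 h with h' | h'
          · exact List.mem_append.2 (Or.inl (by simp [h']))
          · exact List.mem_append.2 (Or.inr h')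
      exact ih (seen ++ [z]) _ x hxr y hy'

theorem pvCF_ub (l : List Int) : ∀ x ∈ l, ∀ y ∈ l, pvMx 32 x y ≤ (pvCF l).2 := by
  intro x hx y hy
  exact pvCF_aux_ub l [] 0 x hx y (by simpa using hy)

theorem pvFoldMax_attain (x : Int) (k : Nat) : ∀ (m : List Int) (b : Int),
    m.foldl (fun a y => max a (pvMx k x y)) b = b ∨
    ∃ y ∈ m, m.foldl (fun a y => max a (pvMx k x y)) b = pvMx k x y := by
  intro m
  induction m with
  | nil => intro b; exact Or.inl rfl
  | cons z m ih =>
    intro b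
    simp only [List.foldl_cons]
    rcases ih (max b (pvMx k x z)) with h | ⟨y, hy, h⟩
    · rcases max_choice b (pvMx k x z) with hm | hm
      · exact Or.inl (by rw [h, hm])
      · exact Or.inr ⟨z, by simp, by rw [h, hm]⟩
    · exact Or.inr ⟨y, by simp [hy], h⟩

theorem pvCF_aux_attain : ∀ (l : List Int) (seen : List Int) (b : Int),
    (l.foldl (fun acc x => (acc.1 ++ [x], max acc.2 (pvMxF (acc.1 ++ [x]) x 32))) (seen, b)).2 = b ∨
    ∃ x ∈ l, ∃ y ∈ seen ++ l,
      (l.foldl (fun acc x => (acc.1 ++ [x], max acc.2 (pvMxF (acc.1 ++ [x]) x 32))) (seen, b)).2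
        = pvMx 32 x y := by
  intro l
  induction l with
  | nil => intro seen b; exact Or.inl rfl
  | cons z rest ih =>
    intro seen b
    simp only [List.foldl_cons]
    rcases ih (seen ++ [z]) (max b (pvMxF (seen ++ [z]) z 32)) with h | ⟨x, hx, y, hy, h⟩
    · rcases max_choice b (pvMxF (seen ++ [z]) z 32) with hm | hm
      · exact Or.inl (by rw [h, hm])
      · -- the step's own inner maximum is attained (or is 0 = the diagonal pair)
        rcases pvFoldMax_attain z 32 (seen ++ [z]) 0 with h0 | ⟨y, hy, h0⟩
        · refine Or.inr ⟨z, by simp, z, by simp, ?_⟩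
          have hzz : pvMx 32 z z = 0 := by
            unfold pvMx
            rw [PySem.Int.bxor_self]
            simp [PySem.Int.band]
          rw [h, hm, hzz]
          exact h0
        · refine Or.inr ⟨z, by simp, y, ?_, by rw [h, hm]; exact h0⟩
          rcases List.mem_append.1 hy with h' | h'
          · exact List.mem_append.2 (Or.inl h')
          · exact List.mem_append.2 (Or.inr (by simp at h'; simp [h']))
    · refine Or.inr ⟨x, by simp [hx], y, ?_, h⟩
      rcases List.mem_append.1 hy with h' | h'
      · rcases List.mem_append.1 h' with h'' | h''
        · exact List.mem_append.2 (Or.inl h'')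
        · exact List.mem_append.2 (Or.inr (by simp at h''; simp [h'']))
      · exact List.mem_append.2 (Or.inr (by simp [h']))

theorem pvCF_attain (l : List Int) (hl : l ≠ []) :
    ∃ x ∈ l, ∃ y ∈ l, (pvCF l).2 = pvMx 32 x y := by
  rcases pvCF_aux_attain l [] 0 with h | ⟨x, hx, y, hy, h⟩
  · -- the value 0 is the diagonal pair of the head
    rcases l with _ | ⟨z, rest⟩
    · exact absurd rfl hl
    · refine ⟨z, by simp, z, by simp, ?_⟩
      have hzz : pvMx 32 z z = 0 := by
        unfold pvMx
        rw [PySem.Int.bxor_self]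
        simp [PySem.Int.band]
      rw [hzz]
      exact h
  · exact ⟨x, hx, y, by simpa using hy, h⟩

-- ---- bit algebra: xor commutes with truncation and with right shift ----

-- Nat: xor splits across the block boundary 2^m
theorem pvNatXorSplit (m b c u v : Nat) (hu : u < 2 ^ m) (hv : v < 2 ^ m) :
    (2 ^ m * b + u) ^^^ (2 ^ m * c + v) = 2 ^ m * (b ^^^ c) + (u ^^^ v) := by
  apply Nat.eq_of_testBit_eq
  intro j
  rw [Nat.testBit_xor, Nat.testBit_two_pow_mul_add b hu j, Nat.testBit_two_pow_mul_add c hv j,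
    Nat.testBit_two_pow_mul_add (b ^^^ c) (Nat.xor_lt_two_pow hu hv) j]
  by_cases hj : j < m
  · simp [hj, Nat.testBit_xor]
  · simp [hj, Nat.testBit_xor]

-- Int版: blockwise xor of a bit piece and a low piece
theorem pvIntXorSplit (m : Nat) (b c u v : Int) (hb : b = 0 ∨ b = 1) (hc : c = 0 ∨ c = 1)
    (hu0 : 0 ≤ u) (hul : u < 2 ^ m) (hv0 : 0 ≤ v) (hvl : v < 2 ^ m) :
    PySem.Int.bxor (2 ^ m * b + u) (2 ^ m * c + v)
      = 2 ^ m * (if b = c then 0 else 1) + PySem.Int.bxor u v := by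
  have hpow : ((2 ^ m : Nat) : Int) = 2 ^ m := by push_cast; ring
  have hub : u.toNat < 2 ^ m := by omega
  have hvb : v.toNat < 2 ^ m := by omega
  have hx0 : (0:Int) ≤ 2 ^ m := by positivity
  rcases hb with rfl | rfl <;> rcases hc with rfl | rfl
  · simp
  · rw [PySem.Int.bxor_of_nonneg (by nlinarith) (by nlinarith),
      PySem.Int.bxor_of_nonneg hu0 hv0,
      show ((2:Int) ^ m * 0 + u).toNat = 2 ^ m * 0 + u.toNat by omega,
      show ((2:Int) ^ m * 1 + v).toNat = 2 ^ m * 1 + v.toNat by omega,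
      pvNatXorSplit m 0 1 u.toNat v.toNat hub hvb]
    have h01 : (0 ^^^ 1 : Nat) = 1 := by decide
    rw [h01]
    push_cast
    norm_num
  · rw [PySem.Int.bxor_of_nonneg (by nlinarith) (by nlinarith),
      PySem.Int.bxor_of_nonneg hu0 hv0,
      show ((2:Int) ^ m * 1 + u).toNat = 2 ^ m * 1 + u.toNat by omega,
      show ((2:Int) ^ m * 0 + v).toNat = 2 ^ m * 0 + v.toNat by omega,
      pvNatXorSplit m 1 0 u.toNat v.toNat hub hvb]
    have h10 : (1 ^^^ 0 : Nat) = 1 := by decide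
    rw [h10]
    push_cast
    norm_num
  · rw [PySem.Int.bxor_of_nonneg (by nlinarith) (by nlinarith),
      PySem.Int.bxor_of_nonneg hu0 hv0,
      show ((2:Int) ^ m * 1 + u).toNat = 2 ^ m * 1 + u.toNat by omega,
      show ((2:Int) ^ m * 1 + v).toNat = 2 ^ m * 1 + v.toNat by omega,
      pvNatXorSplit m 1 1 u.toNat v.toNat hub hvb]
    have h11 : (1 ^^^ 1 : Nat) = 0 := by decide
    rw [h11]
    push_cast
    norm_num

-- (x ^ y) % 2^m = (x % 2^m) ^ (y % 2^m): Python xor commutes with truncation, any sign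
theorem pvModBxor (m : Nat) (x y : Int) :
    PySem.Int.bxor x y % 2 ^ m = PySem.Int.bxor (x % 2 ^ m) (y % 2 ^ m) := by
  induction m with
  | zero =>
    simp [Int.emod_one, PySem.Int.bxor]
  | succ m ih =>
    have hp : (0:Int) < 2 ^ m := by positivity
    have hxu := Int.emod_nonneg x (ne_of_gt hp)
    have hyu := Int.emod_nonneg y (ne_of_gt hp)
    have hxl := Int.emod_lt_of_pos x hp
    have hyl := Int.emod_lt_of_pos y hp
    have hx := pvModSplit x m
    have hy := pvModSplit y m
    have hz := pvModSplit (PySem.Int.bxor x y) m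
    rw [← pvBit_eq_div_mod] at hx hy hz
    rw [hz, ih, hx, hy,
      pvIntXorSplit m (pvBit x m) (pvBit y m) (x % 2 ^ m) (y % 2 ^ m)
        (pvBit_cases x m) (pvBit_cases y m) hxu hxl hyu hyl,
      pvBitBxor]

-- the masked pair xor is the xor of the two truncations
theorem pvMx32_eq (x y : Int) :
    pvMx 32 x y = PySem.Int.bxor (x % 2 ^ 32) (y % 2 ^ 32) := by
  unfold pvMx
  rw [pvBandMask, pvModBxor]

-- the port's per-value prefix is the truncation shifted right
theorem pvPrefix_eq (v : Int) (k : Nat) :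
    PySem.Int.band v 4294967295 >>> k = v % 2 ^ 32 / 2 ^ k := by
  have h : (4294967295 : Int) = 2 ^ 32 - 1 := by norm_num
  rw [h, pvBandMask, Int.shiftRight_eq_div_pow]
  push_cast
  ring_nf

-- xor commutes with the shift on the truncations
theorem pvPrefix_xor (x y : Int) (k : Nat) :
    PySem.Int.bxor (x % 2 ^ 32 / 2 ^ k) (y % 2 ^ 32 / 2 ^ k) = pvMx 32 x y / 2 ^ k := by
  have hp : (0:Int) < 2 ^ 32 := by positivity
  have hx0 := Int.emod_nonneg x (ne_of_gt hp)
  have hy0 := Int.emod_nonneg y (ne_of_gt hp)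
  have hcast : ∀ z : Int, 0 ≤ z → z / 2 ^ k = ((z.toNat / 2 ^ k : Nat) : Int) := by
    intro z hz
    rw [Int.natCast_div]
    push_cast
    rw [Int.toNat_of_nonneg hz]
  rw [pvMx32_eq, PySem.Int.bxor_of_nonneg hx0 hy0,
    hcast _ hx0, hcast _ hy0, hcast _ (by positivity),
    PySem.Int.bxor_of_nonneg (by positivity) (by positivity)]
  simp only [Int.toNat_natCast]
  rw [← Nat.shiftRight_eq_div_pow, ← Nat.shiftRight_eq_div_pow, ← Nat.shiftRight_eq_div_pow,
    ← Nat.shiftRight_xor_distrib]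

-- xor cancellation on nonnegative ints
theorem pvBxor_cancel (a b c : Int) (ha : 0 ≤ a) (hb : 0 ≤ b) (hc : 0 ≤ c) :
    PySem.Int.bxor c a = b ↔ PySem.Int.bxor a b = c := by
  rw [PySem.Int.bxor_of_nonneg hc ha, PySem.Int.bxor_of_nonneg ha hb]
  constructor
  · intro h
    have hbn : b.toNat = c.toNat ^^^ a.toNat := by omega
    rw [hbn, Nat.xor_comm c.toNat a.toNat, ← Nat.xor_assoc, Nat.xor_self, Nat.zero_xor]
    omega
  · intro h
    have hcn : c.toNat = a.toNat ^^^ b.toNat := by omega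
    rw [hcn, Nat.xor_comm (a.toNat ^^^ b.toNat) a.toNat, ← Nat.xor_assoc, Nat.xor_self,
      Nat.zero_xor]
    omega

-- the port's set-membership test says exactly: some pair's shifted masked xor equals cand
theorem pvCond_iff (l : List Int) (k : Nat) (cand : Int) (hc : 0 ≤ cand) :
    ((PySem.Set.ofList (l.map (fun v => PySem.Int.band v 4294967295 >>> k))).any
        (fun p => (PySem.Set.ofList (l.map (fun v => PySem.Int.band v 4294967295 >>> k))).contains
          (PySem.Int.bxor cand p)) = true)
      ↔ ∃ x ∈ l, ∃ y ∈ l, pvMx 32 x y / 2 ^ k = cand := by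
  have hp : (0:Int) < 2 ^ 32 := by positivity
  have hpre0 : ∀ v : Int, 0 ≤ v % 2 ^ 32 / 2 ^ k := by
    intro v
    exact Int.ediv_nonneg (Int.emod_nonneg v (ne_of_gt hp)) (by positivity)
  rw [List.any_eq_true]
  constructor
  · rintro ⟨p, hp1, hp2⟩
    rw [PySem.Set.mem_ofList] at hp1
    obtain ⟨x, hx, hfx⟩ := List.mem_map.1 hp1
    rw [PySem.Set.contains_iff, PySem.Set.mem_ofList] at hp2
    obtain ⟨y, hy, hfy⟩ := List.mem_map.1 hp2
    refine ⟨x, hx, y, hy, ?_⟩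
    rw [pvPrefix_eq] at hfx hfy
    rw [← hfx] at hfy
    rw [← pvPrefix_xor]
    exact (pvBxor_cancel _ _ _ (hpre0 x) (hpre0 y) hc).1 hfy.symm
  · rintro ⟨x, hx, y, hy, hxy⟩
    refine ⟨PySem.Int.band x 4294967295 >>> k, List.mem_map.2 ⟨x, hx, rfl⟩ |>
      (PySem.Set.mem_ofList _ _).2, ?_⟩
    rw [PySem.Set.contains_iff, PySem.Set.mem_ofList]
    refine List.mem_map.2 ⟨y, hy, ?_⟩
    rw [pvPrefix_eq, pvPrefix_eq]
    exact ((pvBxor_cancel _ _ _ (hpre0 x) (hpre0 y) hc).2 (by rw [pvPrefix_xor]; exact hxy)).symm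

-- ---- the greedy loop reconstructs the pairwise maximum bit by bit ----

theorem pvGreedy_step (vals : List Int) (k : Nat) (best : Int) :
    pvGreedy vals (k+1) best
      = if (PySem.Set.ofList (vals.map (fun v => PySem.Int.band v 4294967295 >>> k))).any
            (fun p => (PySem.Set.ofList (vals.map (fun v => PySem.Int.band v 4294967295 >>> k))).contains
              (PySem.Int.bxor (PySem.Int.bor (best <<< (1:Nat)) 1) p)) then
          pvGreedy vals k (PySem.Int.bor (best <<< (1:Nat)) 1)
        else
          pvGreedy vals k (best <<< (1:Nat)) := rfl

theorem pvShlOne (b : Int) : b <<< (1:Nat) = 2 * b := by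
  rw [Int.shiftLeft_eq]
  ring

theorem pvBorOne (b : Int) (hb : 0 ≤ b) : PySem.Int.bor (2 * b) 1 = 2 * b + 1 := by
  have h2 : ((2 ^ (0 + 1) * b.toNat : Nat) : Int) = 2 * b := by
    push_cast
    omega
  have h1 : ((1:Int) <<< (0:Nat)) = 1 := rfl
  have := pvBorAcc 0 b.toNat
  rw [h2, h1] at this
  rw [this]
  norm_num

theorem pvDivStep (P : Int) (k : Nat) : P / 2 ^ k = 2 * (P / 2 ^ (k + 1)) + pvBit P k := by
  have h1 : P / 2 ^ k / 2 = P / 2 ^ (k + 1) := by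
    rw [Int.ediv_ediv_of_nonneg (by positivity)]
    norm_num
    ring
  have h2 := Int.ediv_add_emod (P / 2 ^ k) 2
  rw [pvBit_eq_div_mod, ← h1]
  omega

theorem pvGreedy_main (l : List Int) (hl : l ≠ []) :
    ∀ k : Nat, pvGreedy l k ((pvCF l).2 / 2 ^ k) = (pvCF l).2 := by
  intro k
  induction k with
  | zero =>
    simp [pvGreedy]
  | succ k ih =>
    have hP0 := pvCF_nonneg l
    have hb0 : 0 ≤ (pvCF l).2 / 2 ^ (k + 1) := Int.ediv_nonneg hP0 (by positivity)
    have hdiv := pvDivStep (pvCF l).2 k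
    rw [pvGreedy_step, pvShlOne, pvBorOne _ hb0]
    rcases pvBit_cases (pvCF l).2 k with hbit | hbit
    · -- bit k of the maximum is 0: the candidate is unattainable
      rw [if_neg]
      · rw [show 2 * ((pvCF l).2 / 2 ^ (k + 1)) = (pvCF l).2 / 2 ^ k by omega]
        exact ih
      · rw [pvCond_iff l k _ (by omega)]
        rintro ⟨x, hx, y, hy, hxy⟩
        have hle := pvCF_ub l x hx y hy
        have hmono := Int.ediv_le_ediv (show (0:Int) < 2 ^ k by positivity) hle
        omega
    · -- bit k of the maximum is 1: the attaining pair realises the candidate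
      rw [if_pos]
      · rw [show 2 * ((pvCF l).2 / 2 ^ (k + 1)) + 1 = (pvCF l).2 / 2 ^ k by omega]
        exact ih
      · rw [pvCond_iff l k _ (by omega)]
        obtain ⟨x, hx, y, hy, hxy⟩ := pvCF_attain l hl
        exact ⟨x, hx, y, hy, by rw [← hxy]; omega⟩

theorem pvGreedy_top (l : List Int) (hl : l ≠ []) : pvGreedy l 32 0 = (pvCF l).2 := by
  have h0 : (pvCF l).2 / 2 ^ 32 = 0 :=
    Int.ediv_eq_zero_of_lt (pvCF_nonneg l) (pvCF_lt l)
  rw [← h0]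
  exact pvGreedy_main l hl 32

-- ---- DFS simulation: (visited, xor_path) pair (A) vs single Optional array (B) ----

def pvRelO (vis : List Bool) (xp : List Int) (xo : List (Option Int)) : Prop :=
  vis.length = xo.length ∧ xp.length = xo.length ∧
  ∀ i : Int, (PySem.List.pyGetD vis i false = false ↔ PySem.List.pyGetD xo i none = none) ∧
    PySem.List.pyGetD xp i 0 = (PySem.List.pyGetD xo i none).getD 0

theorem pvRelO_init (k : Nat) :
    pvRelO (List.replicate k false) (List.replicate k 0) (List.replicate k none) := by
  refine ⟨by simp, by simp, ?_⟩
  intro i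
  rw [pvGetRepSame, pvGetRepSame, pvGetRepSame]
  simp

theorem pvRelO_set (vis : List Bool) (xp : List Int) (xo : List (Option Int)) (v cur : Int)
    (h : pvRelO vis xp xo) :
    pvRelO (PySem.List.pySetD vis v true) (PySem.List.pySetD xp v cur)
           (PySem.List.pySetD xo v (some cur)) := by
  obtain ⟨hl1, hl2, hpt⟩ := h
  refine ⟨by rw [PySem.List.length_pySetD, PySem.List.length_pySetD]; exact hl1,
          by rw [PySem.List.length_pySetD, PySem.List.length_pySetD]; exact hl2, ?_⟩
  intro i
  rw [pvGetSet, pvGetSet, pvGetSet, hl1, hl2]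
  rcases hk : PySem.List.pyIdx? xo.length v with _ | k
  · exact hpt i
  · rcases hm : PySem.List.pyIdx? xo.length i with _ | m
    · exact hpt i
    · by_cases hkm : k = m
      · simp only [hkm, if_pos rfl]
        constructor
        · constructor
          · intro hc; exact absurd hc (by simp)
          · intro hc; exact absurd hc (by simp)
        · rfl
      · simp only [if_neg hkm]
        exact hpt i

theorem pvVisit_sim (graph : List (List (Int × Int))) :
    ∀ (fuel : Nat) (vis : List Bool) (xp : List Int) (xo : List (Option Int))
      (u parent cur : Int), pvRelO vis xp xo →
      pvRelO (pvDfs graph fuel (vis, xp) u parent cur).1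
             (pvDfs graph fuel (vis, xp) u parent cur).2
             (pvVisit graph fuel xo u parent cur) := by
  intro fuel
  induction fuel with
  | zero => intro vis xp xo u parent cur h; exact h
  | succ fuel ih =>
    intro vis xp xo u parent cur h
    have aux : ∀ (ns : List (Int × Int)) (st : List Bool × List Int) (xo' : List (Option Int)),
        pvRelO st.1 st.2 xo' →
        pvRelO
          ((ns.foldl (fun st' nw =>
              if nw.1 ≠ parent ∧ PySem.List.pyGetD st'.1 nw.1 false = false then
                pvDfs graph fuel st' nw.1 u (PySem.Int.bxor cur nw.2)
              else st') st)).1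
          ((ns.foldl (fun st' nw =>
              if nw.1 ≠ parent ∧ PySem.List.pyGetD st'.1 nw.1 false = false then
                pvDfs graph fuel st' nw.1 u (PySem.Int.bxor cur nw.2)
              else st') st)).2
          (pvScan (fun xo'' v w => pvVisit graph fuel xo'' v u (PySem.Int.bxor cur w)) parent ns xo') := by
      intro ns
      induction ns with
      | nil => intro st xo' h'; exact h'
      | cons nw ns ihn =>
        intro st xo' h'
        simp only [List.foldl_cons, pvScan]
        by_cases hc : nw.1 ≠ parent ∧ PySem.List.pyGetD st.1 nw.1 false = false
        · have hc' : nw.1 ≠ parent ∧ PySem.List.pyGetD xo' nw.1 none = none :=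
            ⟨hc.1, ((h'.2.2 nw.1).1).1 hc.2⟩
          rw [if_pos hc, if_pos hc']
          exact ihn _ _ (ih st.1 st.2 xo' nw.1 u (PySem.Int.bxor cur nw.2) h')
        · have hc' : ¬ (nw.1 ≠ parent ∧ PySem.List.pyGetD xo' nw.1 none = none) := by
            intro hcc
            exact hc ⟨hcc.1, ((h'.2.2 nw.1).1).2 hcc.2⟩
          rw [if_neg hc, if_neg hc']
          exact ihn _ _ h'
    have hA : pvDfs graph (fuel + 1) (vis, xp) u parent cur
        = (PySem.List.pyGetD graph u []).foldl
            (fun st' nw =>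
              if nw.1 ≠ parent ∧ PySem.List.pyGetD st'.1 nw.1 false = false then
                pvDfs graph fuel st' nw.1 u (PySem.Int.bxor cur nw.2)
              else st')
            (PySem.List.pySetD vis u true, PySem.List.pySetD xp u cur) := rfl
    have hB : pvVisit graph (fuel + 1) xo u parent cur
        = pvScan (fun xo'' v w => pvVisit graph fuel xo'' v u (PySem.Int.bxor cur w)) parent
            (PySem.List.pyGetD graph u []) (PySem.List.pySetD xo u (some cur)) := rfl
    rw [hA, hB]
    exact aux (PySem.List.pyGetD graph u [])
      (PySem.List.pySetD vis u true, PySem.List.pySetD xp u cur)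
      (PySem.List.pySetD xo u (some cur)) (pvRelO_set vis xp xo u cur h)

-- ===== VERDICT (by name: the statement is the Claim_ definition above) =====
theorem xor_longest_path_spec : Claim_equal_xor_longest_path := by
  intro n edges hDom hPre
  unfold Spec_xor_longest_path
  obtain ⟨h1, -⟩ := hPre
  simp only [xor_longest_path, xor_longest_path_alt]
  set ys := pvXorPaths n edges with hys
  -- B's graph is A's graph
  have hgraph : pvGraphB (pvArcs edges) (List.replicate n.toNat []) = pvBuildGraph n edges := by
    rw [pvGraphB_eq_foldl]; rfl
  rw [hgraph]
  set xo := pvVisit (pvBuildGraph n edges) (n.toNat + 1)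
    (List.replicate n.toNat (none : Option Int)) 0 (-1) 0 with hxo
  set vals := xo.map (fun x => match x with | some y => y | none => 0) with hvals
  have hlen : (ys.length : Int) = n := by
    rw [hys, pvXorPaths_len]
    omega
  -- the DFS results agree pointwise
  have hsim := pvVisit_sim (pvBuildGraph n edges) (n.toNat + 1)
    (List.replicate n.toNat false) (List.replicate n.toNat 0)
    (List.replicate n.toNat none) 0 (-1) 0 (pvRelO_init n.toNat)
  rw [← hxo] at hsim
  have hxolen : xo.length = n.toNat := by
    have hx := hsim.2.1
    rw [(pvDfs_len (pvBuildGraph n edges) (n.toNat + 1)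
      (List.replicate n.toNat false, List.replicate n.toNat 0) 0 (-1) 0).2,
      List.length_replicate] at hx
    omega
  have hpt : ∀ i : Int, 0 ≤ i → i < n → PySem.List.pyGetD vals i 0 = PySem.List.pyGetD ys i 0 := by
    intro i hi0 hin
    have hix : i < (xo.length : Int) := by rw [hxolen]; omega
    have hmaplen : i < ((xo.map (fun x => match x with | some y => y | none => 0)).length : Int) := by
      rw [List.length_map]; exact hix
    rw [hvals, PySem.List.pyGetD_eq_getElem _ 0 hi0 hmaplen, List.getElem_map]
    have hyi : PySem.List.pyGetD ys i 0 = (PySem.List.pyGetD xo i none).getD 0 :=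
      (hsim.2.2 i).2
    rw [hyi, PySem.List.pyGetD_eq_getElem xo none hi0 hix]
    rcases xo[i.toNat] with _ | y <;> rfl
  -- B's vals list IS the xor_path list ys
  have hvalsys : vals = ys := by
    apply List.ext_getElem
    · rw [hvals, List.length_map, hxolen, hys, pvXorPaths_len]
    · intro k hk1 hk2
      have hkn : k < n.toNat := by
        rw [hvals, List.length_map, hxolen] at hk1
        exact hk1
      have h0 : (0:Int) ≤ (k:Int) := by positivity
      have hin : (k:Int) < n := by omega
      have hk := hpt (k:Int) h0 hin
      have hv : (k:Int) < (vals.length : Int) := by exact_mod_cast hk1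
      have hy : (k:Int) < (ys.length : Int) := by exact_mod_cast hk2
      rw [PySem.List.pyGetD_eq_getElem vals 0 h0 hv,
        PySem.List.pyGetD_eq_getElem ys 0 h0 hy] at hk
      simpa using hk
  -- both sides now reduce to the pairwise maximum over ys
  rw [← hlen]
  rw [PySem.List.foldl_pyRange_zero_pyGetD' ys 0
    (fun (st : PvTrie × Int) v =>
      (pvInsert st.1 v 32, max st.2 (pvQuery (pvInsert st.1 v 32) v 32 0)))
    (PvTrie.missing, 0)]
  rw [pvALoop]
  rw [hvalsys, pvGreedy_top ys (by
    intro hnil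
    rw [hnil] at hlen
    simp at hlen
    omega)]
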